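-- pv_equiv track=rewrite | github.com/loiconanfah/GoldArmyArgent | agents/cv_adapter.py | _extract_markdown_from_broken_json
-- ===== SOURCE A (Python) =====
-- def _extract_markdown_from_broken_json(raw: str) -> str:
--     """
--     Extrait la valeur de "markdown" d'un JSON invalide (ex: guillemets ou retours à la ligne non échappés).
--     Parcourt la chaîne après "markdown": " et trouve la fin de la valeur en gérant \\ et \".
--     """
--     if not raw:
--         return ""
--     needle = '"markdown"'
--     i = raw.find(needle)
--     if i == -1:
--         return ""
--     i = raw.find('"', i + len(needle))
--     if i == -1:
--         return ""
--     start = i + 1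
--     out = []
--     j = start
--     while j < len(raw):
--         c = raw[j]
--         if c == '\\':
--             if j + 1 < len(raw):
--                 n = raw[j + 1]
--                 if n == 'n':
--                     out.append('\n')
--                 elif n == '"':
--                     out.append('"')
--                 elif n == '\\':
--                     out.append('\\')
--                 else:
--                     out.append(n)
--                 j += 2
--                 continue
--             j += 1
--             continue
--         if c == '"':
--             break
--         out.append(c)
--         j += 1
--     return "".join(out)
-- ===== SOURCE B (Python) =====
-- def _extract_markdown_from_broken_json(raw: str) -> str:
--     i = raw.find('"markdown"')
--     if i == -1:
--         return ""
--     i = raw.find('"', i + 10)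
--     if i == -1:
--         return ""
--     start = i + 1
--     # phase 1: locate the end of the raw value, stepping over escape pairs
--     k = start
--     n = len(raw)
--     while k < n and raw[k] != '"':
--         k += 2 if raw[k] == '\\' else 1
--     # phase 2: decode the segment with an escape flag
--     out = []
--     esc = False
--     for c in raw[start:k]:
--         if esc:
--             out.append('\n' if c == 'n' else c)
--             esc = False
--         elif c == '\\':
--             esc = True
--         else:
--             out.append(c)
--     return "".join(out)
-- ===== Notes on version B (the rewrite author's own statement) =====
-- stated objective: alternative
-- what changed: Replaces A's single fused scan-and-decode while loop (lookahead escape handling inline) with two phases: a boundary scan that only computes the end index of the raw value (stepping 2 over escape pairs) followed by a slice, then a separate escape-flag decoding pass over the segment.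
import Mathlib
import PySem

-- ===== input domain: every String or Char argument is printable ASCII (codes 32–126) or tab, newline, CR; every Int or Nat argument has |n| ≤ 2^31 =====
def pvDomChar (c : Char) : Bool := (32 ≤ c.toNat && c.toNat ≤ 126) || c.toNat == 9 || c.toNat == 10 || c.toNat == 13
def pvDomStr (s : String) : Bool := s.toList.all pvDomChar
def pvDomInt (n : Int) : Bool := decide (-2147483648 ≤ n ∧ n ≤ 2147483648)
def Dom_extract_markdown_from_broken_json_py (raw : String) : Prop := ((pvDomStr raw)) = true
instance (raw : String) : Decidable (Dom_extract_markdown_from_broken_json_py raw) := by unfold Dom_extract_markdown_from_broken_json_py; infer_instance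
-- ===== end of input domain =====

-- B replaces A's fused scan-and-decode loop by a boundary scan + slice, then a separate
-- escape-flag decoding pass (objective: alternative decomposition, same cost).

-- ===== PORT A =====
-- A's escape mapping: n -> '\n', '"' -> '"', '\\' -> '\\', else the char itself
def aEscMap (n : Char) : Char :=
  if n == 'n' then '\n' else if n == '"' then '"' else if n == '\\' then '\\' else n

-- A's while loop over the suffix starting at `start` (index j walks this suffix)
def aLoop : List Char → List Char
  | [] => []
  | [c] =>
    if c == '\\' then []        -- j+1 ≥ len: j += 1, loop exits
    else if c == '"' then []
    else [c]
  | c :: n :: rest =>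
    if c == '\\' then aEscMap n :: aLoop rest
    else if c == '"' then []
    else c :: aLoop (n :: rest)

def extract_markdown_from_broken_json_py (raw : String) : String :=
  if raw = "" then "" else
  let cs := raw.toList
  let i := PySem.Chars.find cs "\"markdown\"".toList
  if i = -1 then "" else
  let i2 := PySem.Chars.findFrom cs ['"'] (i + 10) none
  if i2 = -1 then "" else
  String.ofList (aLoop (cs.drop (i2 + 1).toNat))

-- ===== PORT B =====
-- phase 1: length of the raw value segment (k - start), stepping 2 over escape pairs
def segLen : List Char → Nat
  | [] => 0
  | c :: rest =>
    if c == '"' then 0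
    else if c == '\\' then
      match rest with
      | _ :: rest' => segLen rest' + 2
      | [] => 2                  -- k jumps one past the end; the slice clamps
    else segLen rest + 1

-- phase 2: escape-flag decoding pass
def decodeEsc : Bool → List Char → List Char
  | _, [] => []
  | esc, c :: rest =>
    if esc then (if c == 'n' then '\n' else c) :: decodeEsc false rest
    else if c == '\\' then decodeEsc true rest
    else c :: decodeEsc false rest

def extract_markdown_from_broken_json_py_alt (raw : String) : String :=
  let cs := raw.toList
  let i := PySem.Chars.find cs "\"markdown\"".toList
  if i = -1 then "" else
  let i2 := PySem.Chars.findFrom cs ['"'] (i + 10) none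
  if i2 = -1 then "" else
  let tail := cs.drop (i2 + 1).toNat
  String.ofList (decodeEsc false (tail.take (segLen tail)))

-- ===== PRECONDITION & SPEC =====
def Spec_extract_markdown_from_broken_json_py (raw : String) (out : String) : Prop := out = extract_markdown_from_broken_json_py_alt raw
instance (raw : String) (out : String) : Decidable (Spec_extract_markdown_from_broken_json_py raw out) := by unfold Spec_extract_markdown_from_broken_json_py; infer_instance

-- ===== CLAIM (what is proved, stated in full; the proofs are below) =====
def Claim_equal_extract_markdown_from_broken_json_py : Prop := ∀ (raw : String), Dom_extract_markdown_from_broken_json_py raw → Spec_extract_markdown_from_broken_json_py raw (extract_markdown_from_broken_json_py raw)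

-- ===== LEMMAS AND PROOFS =====
theorem aLoop_eq_decode : ∀ cs : List Char, aLoop cs = decodeEsc false (cs.take (segLen cs))
  | [] => rfl
  | [c] => by
    by_cases h1 : c = '\\'
    · subst h1; simp [aLoop, segLen, decodeEsc]
    · by_cases h2 : c = '"' <;> simp [aLoop, segLen, decodeEsc, h1, h2]
  | c :: n :: rest => by
    by_cases h1 : c = '\\'
    · subst h1
      have hmap : aEscMap n = if n == 'n' then '\n' else n := by
        by_cases hn : n = 'n'
        · simp [aEscMap, hn]
        · by_cases hq : n = '"'
          · simp [aEscMap, hq]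
          · by_cases hb : n = '\\' <;> simp [aEscMap, hn, hq, hb]
      simp [aLoop, segLen, decodeEsc, hmap, aLoop_eq_decode rest]
    · by_cases h2 : c = '"' <;>
        simp [aLoop, segLen, decodeEsc, h1, h2, aLoop_eq_decode (n :: rest)]
  termination_by cs => cs.length

-- ===== VERDICT (by name: the statement is the Claim_ definition above) =====
theorem extract_markdown_from_broken_json_py_spec : Claim_equal_extract_markdown_from_broken_json_py := by
  intro raw _
  unfold Spec_extract_markdown_from_broken_json_py
  by_cases h : raw = ""
  · subst h; decide
  · unfold extract_markdown_from_broken_json_py extract_markdown_from_broken_json_py_alt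
    rw [if_neg h]
    simp only [aLoop_eq_decode]
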